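-- pv_equiv track=rewrite | github.com/ohigusu/Coding-study2_programmers | 프로그래머스/2/42626. 더 맵게/더 맵게.py | solution
-- ===== SOURCE A (Python) =====
-- import heapq
--
-- def solution(scoville,K):
--     answer = 0
--     heapq.heapify(scoville)
--     while scoville:
--         smallest = scoville[0]
--         if smallest >= K:
--             return answer
--         if len(scoville) < 2:
--             return -1
--         first = heapq.heappop(scoville)
--         second = heapq.heappop(scoville)
--         new_scoville = first + second * 2
--
--         heapq.heappush(scoville, new_scoville)
--
--         answer += 1
--     return -1
-- ===== SOURCE B (Python) =====
-- def solution(scoville, K):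
--     answer = 0
--     scoville.sort()
--     while scoville:
--         if scoville[0] >= K:
--             return answer
--         if len(scoville) < 2:
--             return -1
--         first = scoville.pop(0)
--         second = scoville.pop(0)
--         new_val = first + second * 2
--         i = 0
--         while i < len(scoville) and scoville[i] <= new_val:
--             i += 1
--         scoville.insert(i, new_val)
--         answer += 1
--     return -1
-- ===== Notes on version B (the rewrite author's own statement) =====
-- stated objective: alternative
-- what changed: Replaced the binary heap with a maintained sorted list: sort once, read/pop the two smallest from the front, and re-insert the mixed value at its sorted position by a linear scan instead of a heap sift.
import Mathlib
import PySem

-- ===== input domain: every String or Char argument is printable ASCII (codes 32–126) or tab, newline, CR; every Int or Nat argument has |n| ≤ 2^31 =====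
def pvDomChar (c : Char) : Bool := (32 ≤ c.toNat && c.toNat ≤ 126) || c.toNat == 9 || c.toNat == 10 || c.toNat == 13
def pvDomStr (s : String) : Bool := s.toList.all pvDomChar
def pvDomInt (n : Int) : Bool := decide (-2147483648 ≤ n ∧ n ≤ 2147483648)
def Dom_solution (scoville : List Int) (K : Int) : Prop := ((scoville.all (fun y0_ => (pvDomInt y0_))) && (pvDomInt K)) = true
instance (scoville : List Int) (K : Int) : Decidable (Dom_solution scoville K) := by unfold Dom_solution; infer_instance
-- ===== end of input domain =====

-- B replaces A's binary heap by a maintained sorted list (sort once, pop from the front,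
-- linear-scan re-insertion); objective: alternative. Both Pythons mutate `scoville` in
-- place (A heapifies/pops it, B sorts/pops it); the equivalence proved here is about the
-- RETURN value only.

-- ===== PORT A =====
-- The heapq calls are ported by their documented semantics on the multiset of elements:
-- after heapify, scoville[0] (the heap root) is the minimum (`heapMin`), and each
-- heappop returns the minimum and removes one occurrence of it (`List.erase`);
-- heappush adds the element to the multiset.  Only the root read, the pops and the
-- length are observed by A, so this is exact for the returned value.
def heapMin : List Int → Int
  | [] => 0
  | x :: xs => xs.foldl min x

lemma foldl_min_mem : ∀ (xs : List Int) (x : Int), xs.foldl min x = x ∨ xs.foldl min x ∈ xs := by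
  intro xs
  induction xs with
  | nil => intro x; left; rfl
  | cons y ys ih =>
    intro x
    rcases ih (min x y) with h | h
    · rcases le_total x y with hxy | hxy
      · left; simpa [List.foldl, min_eq_left hxy] using h
      · right; simp only [List.foldl] at h ⊢; rw [h, min_eq_right hxy]; exact List.mem_cons_self
    · right; exact List.mem_cons_of_mem _ h

lemma heapMin_mem (l : List Int) (h : l ≠ []) : heapMin l ∈ l := by
  cases l with
  | nil => exact absurd rfl h
  | cons x xs =>
    rcases foldl_min_mem xs x with h' | h'
    · simp [heapMin, h']
    · exact List.mem_cons_of_mem _ (by simpa [heapMin] using h')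

def goA (K : Int) (l : List Int) (answer : Int) : Int :=
  match l with
  | [] => -1                                   -- while loop exits, final `return -1`
  | x :: xs =>
    let smallest := heapMin (x :: xs)          -- scoville[0] of the heap = its minimum
    if smallest ≥ K then answer
    else if _h2 : (x :: xs).length < 2 then -1
    else
      let first := smallest                    -- heappop returns the root just read
      let l1 := (x :: xs).erase first
      let second := heapMin l1                 -- second heappop
      let l2 := l1.erase second
      goA K (l2 ++ [first + second * 2]) (answer + 1)   -- heappush, answer += 1
termination_by l.length
decreasing_by
  have hm : heapMin (x :: xs) ∈ x :: xs := heapMin_mem _ (by simp)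
  have h1 : ((x :: xs).erase (heapMin (x :: xs))).length = xs.length := by
    rw [List.length_erase_of_mem hm]; simp
  have hxs : 1 ≤ xs.length := by
    simp only [List.length_cons, not_lt] at _h2; omega
  have hne : (x :: xs).erase (heapMin (x :: xs)) ≠ [] := by
    intro hnil; rw [hnil] at h1; simp at h1; omega
  have hm2 : heapMin ((x :: xs).erase (heapMin (x :: xs))) ∈ (x :: xs).erase (heapMin (x :: xs)) :=
    heapMin_mem _ hne
  have h3 := List.length_erase_of_mem hm2
  simp only [List.length_append, List.length_cons, List.length_nil]
  omega

def solution (scoville : List Int) (K : Int) : Int :=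
  goA K scoville 0   -- heapify reorders in place; on the multiset it is the identity

-- ===== PORT B =====
-- B maintains a sorted list; the linear-scan insertion of Source B is `insort`.
def insort (x : Int) : List Int → List Int
  | [] => [x]
  | y :: ys => if y ≤ x then y :: insort x ys else x :: y :: ys

lemma insort_length (x : Int) (l : List Int) : (insort x l).length = l.length + 1 := by
  induction l with
  | nil => rfl
  | cons y ys ih => simp only [insort]; split <;> simp [ih]

def goB (K : Int) (s : List Int) (answer : Int) : Int :=
  match s with
  | [] => -1
  | x :: rest =>
    if x ≥ K then answer
    else match rest with
      | [] => -1
      | y :: rest2 => goB K (insort (x + y * 2) rest2) (answer + 1)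
termination_by s.length
decreasing_by simp [insort_length]

def solution_alt (scoville : List Int) (K : Int) : Int :=
  goB K (PySem.List.sorted scoville (fun x => x) false) 0

-- ===== PRECONDITION & SPEC =====
def Spec_solution (scoville : List Int) (K : Int) (out : Int) : Prop := out = solution_alt scoville K
instance (scoville : List Int) (K : Int) (out : Int) : Decidable (Spec_solution scoville K out) := by unfold Spec_solution; infer_instance

-- ===== CLAIM (what is proved, stated in full; the proofs are below) =====
def Claim_equal_solution : Prop := ∀ (scoville : List Int) (K : Int), Dom_solution scoville K → Spec_solution scoville K (solution scoville K)

-- ===== LEMMAS AND PROOFS =====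

lemma foldl_min_le_init : ∀ (xs : List Int) (x : Int), xs.foldl min x ≤ x := by
  intro xs
  induction xs with
  | nil => intro x; simp
  | cons y ys ih => intro x; exact le_trans (ih (min x y)) (min_le_left _ _)

lemma foldl_min_le_mem : ∀ (xs : List Int) (x y : Int), y ∈ xs → xs.foldl min x ≤ y := by
  intro xs
  induction xs with
  | nil => intro x y hy; simp at hy
  | cons z zs ih =>
    intro x y hy
    rcases List.mem_cons.1 hy with rfl | h
    · exact le_trans (foldl_min_le_init zs (min x y)) (min_le_right _ _)
    · exact ih _ _ h

lemma heapMin_le (l : List Int) (y : Int) (hy : y ∈ l) : heapMin l ≤ y := by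
  cases l with
  | nil => simp at hy
  | cons x xs =>
    simp only [heapMin]
    rcases List.mem_cons.1 hy with rfl | h
    · exact foldl_min_le_init xs y
    · exact foldl_min_le_mem xs x y h

lemma heapMin_eq_head (l : List Int) (m : Int) (t : List Int)
    (hp : l.Perm (m :: t)) (hs : (m :: t).Sorted (· ≤ ·)) : heapMin l = m := by
  have hne : l ≠ [] := by
    intro h; subst h
    have := hp.length_eq; simp at this
  have hmem : heapMin l ∈ m :: t := hp.mem_iff.1 (heapMin_mem l hne)
  have h1 : m ≤ heapMin l := by
    rcases List.mem_cons.1 hmem with h | h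
    · exact h.ge
    · exact (List.sorted_cons.1 hs).1 _ h
  have h2 : heapMin l ≤ m := heapMin_le l m (hp.mem_iff.2 List.mem_cons_self)
  exact le_antisymm h2 h1

lemma insort_perm (x : Int) (l : List Int) : (insort x l).Perm (x :: l) := by
  induction l with
  | nil => simp [insort, List.pairwise_singleton]
  | cons y ys ih =>
    simp only [insort]
    split
    · exact (ih.cons y).trans (List.Perm.swap x y ys)
    · exact List.Perm.refl _

lemma insort_sorted (x : Int) (l : List Int) (h : l.Sorted (· ≤ ·)) :
    (insort x l).Sorted (· ≤ ·) := by
  induction l with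
  | nil => simpa [insort] using List.sorted_singleton _ x
  | cons y ys ih =>
    obtain ⟨hy, hys⟩ := List.pairwise_cons.1 h
    simp only [insort]
    split
    · rename_i hyx
      refine List.pairwise_cons.2 ⟨?_, ih hys⟩
      intro b hb
      rcases List.mem_cons.1 ((insort_perm x ys).mem_iff.1 hb) with rfl | h'
      · exact hyx
      · exact hy _ h'
    · rename_i hyx
      push_neg at hyx
      refine List.pairwise_cons.2 ⟨?_, h⟩
      intro b hb
      rcases List.mem_cons.1 hb with rfl | h'
      · exact hyx.le
      · exact le_trans hyx.le (hy _ h')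

lemma go_eq (K : Int) : ∀ (n : ℕ) (l s : List Int) (a : Int),
    l.length = n → l.Perm s → s.Sorted (· ≤ ·) → goA K l a = goB K s a := by
  intro n
  induction n using Nat.strong_induction_on with
  | _ n ih =>
    intro l s a hlen hp hs
    cases l with
    | nil =>
      have : s = [] := hp.symm.eq_nil
      subst this
      simp [goA, goB]
    | cons x xs =>
      obtain ⟨m, t, rfl⟩ : ∃ m t, s = m :: t := by
        cases s with
        | nil => exact absurd hp.eq_nil (by simp)
        | cons m t => exact ⟨m, t, rfl⟩
      have hmin : heapMin (x :: xs) = m := heapMin_eq_head _ _ _ hp hs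
      rw [goA, goB.eq_def]
      simp only []
      simp only [hmin]
      by_cases hK : m ≥ K
      · simp [hK]
      · simp only [hK, if_false]
        have hlen2 : (x :: xs).length = (m :: t).length := hp.length_eq
        cases t with
        | nil =>
          have hlt2 : (x :: xs).length < 2 := by
            rw [hlen2]; simp
          rw [dif_pos hlt2]
        | cons y t2 =>
          have hnot : ¬ (x :: xs).length < 2 := by
            rw [hlen2]; simp
          simp only [hnot, dif_neg, not_false_iff]
          -- the two pops
          have hp1 : ((x :: xs).erase m).Perm (y :: t2) := by
            have := hp.erase m
            rwa [List.erase_cons_head] at this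
          have hs1 : (y :: t2).Sorted (· ≤ ·) := hs.of_cons
          have hsecond : heapMin ((x :: xs).erase m) = y := heapMin_eq_head _ _ _ hp1 hs1
          rw [hsecond]
          have hp2 : (((x :: xs).erase m).erase y).Perm t2 := by
            have := hp1.erase y
            rwa [List.erase_cons_head] at this
          set v := m + y * 2 with hv
          have hpush : ((((x :: xs).erase m).erase y) ++ [v]).Perm (insort v t2) := by
            refine ((hp2.append_right [v]).trans ?_).trans (insort_perm v t2).symm
            exact List.perm_append_singleton v t2
          have hss : (insort v t2).Sorted (· ≤ ·) := insort_sorted v t2 hs1.of_cons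
          -- length bookkeeping for the induction
          have hm1 : m ∈ x :: xs := hp.mem_iff.2 List.mem_cons_self
          have hm2 : y ∈ (x :: xs).erase m := hp1.mem_iff.2 List.mem_cons_self
          have e1 := List.length_erase_of_mem hm1
          have e2 := List.length_erase_of_mem hm2
          have hlt : ((((x :: xs).erase m).erase y) ++ [v]).length < n := by
            simp only [List.length_append, List.length_cons, List.length_nil] at e1 e2 hlen hlen2 ⊢
            omega
          exact ih _ hlt _ _ _ rfl hpush hss

-- ===== VERDICT (by name: the statement is the Claim_ definition above) =====
theorem solution_spec : Claim_equal_solution := by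
  intro scoville K _
  unfold Spec_solution solution solution_alt
  exact go_eq K scoville.length scoville _ 0 rfl (PySem.List.sorted_perm ..).symm
    (by simpa [List.Sorted] using PySem.List.sorted_pairwise scoville (fun x => x))
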